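-- pv_equiv track=rewrite | github.com/anmol5936/Challenge_1b | src/components/subsection_refiner.py | _improve_structure
-- ===== SOURCE A (Python) =====
-- def _improve_structure(text: str) -> str:
--     """Improve text structure and flow"""
--     sentences = [s.strip() for s in text.split('.') if s.strip()]
--
--     if len(sentences) <= 1:
--         return text
--
--     # Add transition words where appropriate
--     improved_sentences = []
--     for i, sentence in enumerate(sentences):
--         if i > 0 and len(sentence) > 20:
--             # Add contextual transitions
--             if any(word in sentence.lower() for word in ['also', 'additionally', 'furthermore']):
--                 pass  # Already has transition
--             elif i == 1:
--                 sentence = "Additionally, " + sentence.lower()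
--             elif 'however' not in sentence.lower() and 'but' not in sentence.lower():
--                 if i == len(sentences) - 1:
--                     sentence = "Finally, " + sentence.lower()
--
--         improved_sentences.append(sentence)
--
--     return '. '.join(improved_sentences) + '.'
-- ===== SOURCE B (Python) =====
-- def _improve_structure(text: str) -> str:
--     """Improve text structure and flow"""
--     sentences = [s.strip() for s in text.split('.') if s.strip()]
--     n = len(sentences)
--     if n <= 1:
--         return text
--
--     # Build the result string directly, back to front: no intermediate
--     # improved list and no join; each step prepends one (possibly
--     # rewritten) sentence with its separator onto the accumulated tail.
--     out = ""
--     for i in range(n - 1, -1, -1):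
--         s = sentences[i]
--         low = s.lower()
--         if len(s) > 20 and all(w not in low for w in ('also', 'additionally', 'furthermore')):
--             if i == 1:
--                 s = "Additionally, " + low
--             elif i == n - 1 and 'however' not in low and 'but' not in low:
--                 s = "Finally, " + low
--         out = s + ". " + out if out else s + "."
--     return out
-- ===== Notes on version B (the rewrite author's own statement) =====
-- stated objective: alternative
-- what changed: B replaces A's forward enumerate-loop that builds an improved_sentences list and then joins it with a back-to-front pass that builds the result string directly, prepending each (possibly rewritten) sentence and its separator onto the accumulated tail, with no intermediate list and no join.
import Mathlib
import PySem

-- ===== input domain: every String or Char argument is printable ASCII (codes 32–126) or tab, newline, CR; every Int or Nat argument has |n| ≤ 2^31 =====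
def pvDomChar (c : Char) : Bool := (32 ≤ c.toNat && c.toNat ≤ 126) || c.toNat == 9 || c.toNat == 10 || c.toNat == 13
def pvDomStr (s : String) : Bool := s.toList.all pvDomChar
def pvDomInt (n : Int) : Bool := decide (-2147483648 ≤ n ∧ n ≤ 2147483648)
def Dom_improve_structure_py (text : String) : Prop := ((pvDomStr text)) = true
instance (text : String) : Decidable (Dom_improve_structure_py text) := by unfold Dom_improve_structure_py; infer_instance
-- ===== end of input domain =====

-- B builds the output string back-to-front in one pass (no improved list, no join), instead of A's forward enumerate-loop plus join; objective: alternative.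


-- ===== PORT A =====
-- [s.strip() for s in text.split('.') if s.strip()]
def pvSentences (text : String) : List String :=
  (((PySem.Str.split? text ".").getD []).map PySem.Str.strip).filter (fun s => s ≠ "")

-- any(word in sentence.lower() for word in ['also', 'additionally', 'furthermore'])
def pvHasTransition (low : String) : Bool :=
  ["also", "additionally", "furthermore"].any (fun w => PySem.Str.isIn w low)

-- the body of A's for-loop: how sentence number i is rewritten (n = len(sentences))
def pvAStep (n : Int) (p : Int × String) : String :=
  if p.1 > 0 && PySem.Str.len p.2 > 20 then
    if pvHasTransition (PySem.Str.lower p.2) then p.2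
    else if p.1 == 1 then "Additionally, " ++ PySem.Str.lower p.2
    else if !PySem.Str.isIn "however" (PySem.Str.lower p.2) && !PySem.Str.isIn "but" (PySem.Str.lower p.2) then
      if p.1 == n - 1 then "Finally, " ++ PySem.Str.lower p.2 else p.2
    else p.2
  else p.2

def improve_structure_py (text : String) : String :=
  let sentences := pvSentences text
  if sentences.length ≤ 1 then text
  else
    let improved := (PySem.List.enumerate sentences).foldl
      (fun acc p => acc ++ [pvAStep (sentences.length : Int) p]) []
    PySem.Str.join ". " improved ++ "."

-- ===== PORT B =====
-- all(w not in low for w in ('also', 'additionally', 'furthermore'))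
def pvNoTransition (low : String) : Bool :=
  ["also", "additionally", "furthermore"].all (fun w => !PySem.Str.isIn w low)

-- the body of B's backward for-loop over i ∈ range(n-1, -1, -1)
def pvBStep (n : Int) (sentences : List String) (out : String) (i : Int) : String :=
  let s := (PySem.List.pyGet? sentences i).getD ""
  let low := PySem.Str.lower s
  let s' :=
    if PySem.Str.len s > 20 && pvNoTransition low then
      if i == 1 then "Additionally, " ++ low
      else if i == n - 1 && !PySem.Str.isIn "however" low && !PySem.Str.isIn "but" low then
        "Finally, " ++ low
      else s
    else s
  if out == "" then s' ++ "." else s' ++ ". " ++ out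

def improve_structure_py_alt (text : String) : String :=
  let sentences := pvSentences text
  let n : Int := sentences.length
  if n ≤ 1 then text
  else (PySem.List.pyRange (n - 1) (-1) (-1)).foldl (pvBStep n sentences) ""

-- ===== PRECONDITION & SPEC =====
def Spec_improve_structure_py (text : String) (out : String) : Prop := out = improve_structure_py_alt text
instance (text : String) (out : String) : Decidable (Spec_improve_structure_py text out) := by unfold Spec_improve_structure_py; infer_instance

-- ===== CLAIM =====
def Claim_equal_improve_structure_py : Prop := ∀ (text : String), Dom_improve_structure_py text → Spec_improve_structure_py text (improve_structure_py text)

-- ===== LEMMAS AND PROOFS =====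

theorem pv_append_dot_ne_empty (x : String) : (x ++ "." = "") → False := by
  intro h
  have := congrArg String.toList h
  simp at this

-- B's per-sentence rewrite equals A's loop-body rewrite, for valid indices with n ≥ 2
theorem pv_step_val_eq (n i : Int) (s : String) (h0 : 0 ≤ i) (hi : i < n) (h2 : 2 ≤ n) :
    (if PySem.Str.len s > 20 && pvNoTransition (PySem.Str.lower s) then
      if i == 1 then "Additionally, " ++ PySem.Str.lower s
      else if i == n - 1 && !PySem.Str.isIn "however" (PySem.Str.lower s) && !PySem.Str.isIn "but" (PySem.Str.lower s) then
        "Finally, " ++ PySem.Str.lower s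
      else s
    else s) = pvAStep n (i, s) := by
  have hnot : pvNoTransition (PySem.Str.lower s) = !pvHasTransition (PySem.Str.lower s) := by
    simp [pvNoTransition, pvHasTransition]
  unfold pvAStep
  rcases eq_or_ne i 0 with h | hne0
  · subst h
    have : ¬ ((0:Int) == n - 1) = true := by simp; omega
    simp [this]
  · have hpos : (0:Int) < i := lt_of_le_of_ne h0 (Ne.symm hne0)
    rcases eq_or_ne i 1 with h1 | h1
    · subst h1
      simp [hnot, hpos]
      split_ifs <;> simp_all
    · rcases eq_or_ne i (n - 1) with hl | hl
      · simp [hnot, hl]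
        split_ifs <;> simp_all
      · simp [hnot, hpos, h1, hl]

-- the backward fold from index a down to 0-suffix… actually forward foldr over pyRange a n 1
theorem pv_foldr_eq (sentences : List String) (h2 : 2 ≤ sentences.length) :
    ∀ (k : Nat) (a : Nat), a + k = sentences.length → 1 ≤ k →
    (PySem.List.pyRange (a : Int) (sentences.length : Int) 1).foldr
        (fun i out => pvBStep (sentences.length : Int) sentences out i) ""
      = PySem.Str.join ". "
          ((PySem.List.enumerate (sentences.drop a) (a : Int)).map (pvAStep (sentences.length : Int))) ++ "." := by
  intro k
  induction k with
  | zero => intro a _ h1; omega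
  | succ k ih =>
    intro a ha _
    have haN : a < sentences.length := by omega
    have hacast : (a : Int) < (sentences.length : Int) := by exact_mod_cast haN
    rw [PySem.List.pyRange_one_cons hacast]
    have hdrop : sentences.drop a = sentences[a] :: sentences.drop (a + 1) :=
      List.drop_eq_getElem_cons haN
    have hget : (PySem.List.pyGet? sentences (a : Int)).getD "" = sentences[a] := by
      rw [PySem.List.pyGet?_natCast sentences a, List.getElem?_eq_getElem haN]; rfl
    rcases Nat.eq_zero_or_pos k with hk0 | hkpos
    · -- last index: a = length - 1
      subst hk0
      have hlen : ((a : Int) + 1) = (sentences.length : Int) := by omega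
      have hrest : PySem.List.pyRange ((a : Int) + 1) (sentences.length : Int) 1 = [] := by
        rw [hlen]; exact PySem.List.pyRange_one_eq_nil le_rfl
      have hdrop1 : sentences.drop (a + 1) = [] := by
        apply List.drop_eq_nil_of_le; omega
      rw [hrest]
      simp only [List.foldr_cons, List.foldr_nil]
      rw [hdrop, hdrop1]
      simp only [PySem.List.enumerate_cons, PySem.List.enumerate_nil, List.map_cons, List.map_nil]
      unfold pvBStep
      simp only [hget, beq_self_eq_true, if_true]
      rw [pv_step_val_eq _ _ _ (by positivity) hacast (by exact_mod_cast h2)]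
      have : PySem.Str.join ". " [pvAStep (sentences.length : Int) ((a : Int), sentences[a])]
          = pvAStep (sentences.length : Int) ((a : Int), sentences[a]) := by
        apply String.ext
        simp [PySem.Str.toList_join, PySem.Chars.join_singleton]
      rw [this]
    · -- a + 1 still in range
      have ih' := ih (a + 1) (by omega) hkpos
      have hcast1 : ((a + 1 : Nat) : Int) = (a : Int) + 1 := by push_cast; ring
      rw [hcast1] at ih'
      simp only [List.foldr_cons]
      rw [ih']
      have hdropne : sentences.drop (a + 1) ≠ [] := by
        intro h
        have := List.drop_eq_nil_iff.mp h
        omega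
      obtain ⟨y, t, hyt⟩ := List.exists_cons_of_ne_nil hdropne
      rw [hdrop, hyt]
      simp only [PySem.List.enumerate_cons, List.map_cons]
      unfold pvBStep
      simp only [hget]
      rw [if_neg (fun hc => pv_append_dot_ne_empty _ (eq_of_beq hc))]
      rw [pv_step_val_eq _ _ _ (by positivity) hacast (by exact_mod_cast h2)]
      rw [← hcast1]
      apply String.ext
      simp only [String.toList_append, PySem.Str.toList_join, List.map_cons,
        PySem.Chars.join_cons_cons]
      simp [List.append_assoc]

-- ===== VERDICT =====
theorem improve_structure_py_spec : Claim_equal_improve_structure_py := by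
  intro text _
  unfold Spec_improve_structure_py improve_structure_py improve_structure_py_alt
  by_cases h : (pvSentences text).length ≤ 1
  · simp only [h, if_true]
    have h' : ((pvSentences text).length : Int) ≤ 1 := by exact_mod_cast h
    simp [h']
  · have h2 : 2 ≤ (pvSentences text).length := by omega
    have h' : ¬ ((pvSentences text).length : Int) ≤ 1 := by
      omega
    simp only [h, h', if_false]
    rw [PySem.List.foldl_append_singleton_eq_map]
    simp only [List.nil_append]
    have hrange : PySem.List.pyRange (((pvSentences text).length : Int) - 1) (-1) (-1)
        = (PySem.List.pyRange 0 ((pvSentences text).length : Int) 1).reverse := by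
      rw [PySem.List.pyRange_neg_one_eq_reverse]
      norm_num
    rw [hrange, List.foldl_reverse]
    have := pv_foldr_eq (pvSentences text) h2 (pvSentences text).length 0 (by omega) (by omega)
    simp only [Nat.cast_zero, List.drop_zero] at this
    rw [this]
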